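-- pv_equiv track=rewrite | github.com/pypi-data/pypi-mirror-403 | packages/unphishable/unphishable-7.0.2.tar.gz/unphishable-7.0.2/unphishable.py | has_misleading_numbers
-- ===== SOURCE A (Python) =====
-- def has_misleading_numbers(domain):
--     suspicious_digits = {'0', '1', '3', '4', '5', '7'}
--     found = set()
--     lower = domain.lower()
--     for d in suspicious_digits:
--         if d in lower:
--             found.add(d)
--     if found:
--         return True, f"Detected misleading digits: {', '.join(sorted(found))}"
--     return False, "None"
-- ===== SOURCE B (Python) =====
-- def has_misleading_numbers(domain):
--     suspicious_digits = {'0', '1', '3', '4', '5', '7'}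
--     found = sorted({c for c in domain.lower() if c in suspicious_digits})
--     if found:
--         return True, "Detected misleading digits: " + ", ".join(found)
--     return False, "None"
-- ===== Notes on version B (the rewrite author's own statement) =====
-- stated objective: idiomatic
-- what changed: B makes a single pass over the string (a set comprehension collecting suspicious characters, then one sort+join of the found set) instead of A's six separate whole-string substring scans with per-digit set insertion.
import Mathlib
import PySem

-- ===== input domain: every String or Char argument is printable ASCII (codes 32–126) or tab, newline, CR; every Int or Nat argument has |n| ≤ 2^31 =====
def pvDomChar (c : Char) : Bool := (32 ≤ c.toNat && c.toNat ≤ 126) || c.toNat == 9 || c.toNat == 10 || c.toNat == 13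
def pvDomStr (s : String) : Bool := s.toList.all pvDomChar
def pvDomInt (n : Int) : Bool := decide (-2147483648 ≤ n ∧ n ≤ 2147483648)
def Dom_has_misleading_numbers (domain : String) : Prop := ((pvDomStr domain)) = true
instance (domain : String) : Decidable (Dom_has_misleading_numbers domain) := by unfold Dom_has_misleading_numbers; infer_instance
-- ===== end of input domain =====

-- B replaces A's six whole-string substring scans by one pass over the string
-- collecting the suspicious characters into a set (objective: idiomatic single pass).

-- ===== PORT A =====
def has_misleading_numbers (domain : String) : Bool × String :=
  let suspicious_digits : PySem.Set String := PySem.Set.ofList ["0", "1", "3", "4", "5", "7"]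
  let lower := PySem.Str.lower domain
  let found : PySem.Set String :=
    suspicious_digits.foldl
      (fun found d => if PySem.Str.isIn d lower then PySem.Set.add found d else found)
      PySem.Set.empty
  if found ≠ [] then
    (true, "Detected misleading digits: " ++ PySem.Str.join ", " (PySem.List.sorted found (fun x => x) false))
  else
    (false, "None")

-- ===== PORT B =====
def has_misleading_numbers_alt (domain : String) : Bool × String :=
  let suspicious_digits : List Char := ['0', '1', '3', '4', '5', '7']
  let found : List Char :=
    PySem.List.sorted
      (PySem.Set.ofList ((PySem.Str.lower domain).toList.filter (fun c => decide (c ∈ suspicious_digits))))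
      (fun x => x) false
  if found ≠ [] then
    (true, "Detected misleading digits: " ++ PySem.Str.join ", " (found.map (fun c => String.ofList [c])))
  else
    (false, "None")

-- ===== PRECONDITION & SPEC =====
def Spec_has_misleading_numbers (domain : String) (out : Bool × String) : Prop := out = has_misleading_numbers_alt domain
instance (domain : String) (out : Bool × String) : Decidable (Spec_has_misleading_numbers domain out) := by unfold Spec_has_misleading_numbers; infer_instance

-- ===== CLAIM (what is proved, stated in full; the proofs are below) =====
def Claim_equal_has_misleading_numbers : Prop := ∀ (domain : String), Dom_has_misleading_numbers domain → Spec_has_misleading_numbers domain (has_misleading_numbers domain)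

-- ===== LEMMAS AND PROOFS =====

-- a single character is a substring iff it is an element
theorem isIn_single (c : Char) (l : List Char) :
    PySem.Chars.isIn [c] l = decide (c ∈ l) := by
  by_cases h : c ∈ l
  · rw [decide_eq_true h, PySem.Chars.isIn_iff_infix]
    obtain ⟨s, r, hlr⟩ := List.append_of_mem h
    exact ⟨s, r, by simp [hlr]⟩
  · rw [decide_eq_false h, ← Bool.not_eq_true, PySem.Chars.isIn_iff_infix]
    intro hinf
    exact h (hinf.subset (List.mem_singleton_self c))

-- sorted(set(xs)) enumerated through a strictly increasing superlist D
theorem sorted_ofList_eq_filter (D xs : List Char) (hD : D.Pairwise (· < ·))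
    (hsub : ∀ x ∈ xs, x ∈ D) :
    PySem.List.sorted (PySem.Set.ofList xs) (fun x => x) false
      = D.filter (fun c => decide (c ∈ xs)) := by
  apply PySem.List.sorted_eq_of_perm_of_pairwise_lt
  · rw [List.perm_ext_iff_of_nodup (List.Nodup.filter _ hD.nodup) (PySem.Set.nodup_ofList xs)]
    intro a
    simp only [List.mem_filter, decide_eq_true_eq, PySem.Set.mem_ofList]
    exact ⟨fun h => h.2, fun h => ⟨hsub a h, h⟩⟩
  · exact List.Pairwise.filter _ hD

-- an already strictly increasing list of strings is its own sorted order
theorem sorted_self_strings (L : List String)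
    (h : L.Pairwise (fun a b => a.toList < b.toList)) :
    PySem.List.sorted L (fun x => x) false = L :=
  PySem.List.sorted_eq_self_of_pairwise L (fun x => x)
    (h.imp (fun hab => le_of_lt (String.lt_iff_toList_lt.mpr hab)))

-- ===== VERDICT (by name: the statement is the Claim_ definition above) =====
theorem has_misleading_numbers_spec : Claim_equal_has_misleading_numbers := by
  intro domain _
  show has_misleading_numbers domain = has_misleading_numbers_alt domain
  have hB := sorted_ofList_eq_filter ['0', '1', '3', '4', '5', '7']
    ((PySem.Chars.lower domain.toList).filter (fun c => decide (c ∈ ['0', '1', '3', '4', '5', '7'])))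
    (by decide) (fun x hx => by simpa using (List.mem_filter.mp hx).2)
  simp only [has_misleading_numbers, has_misleading_numbers_alt, PySem.Str.isIn_eq,
    PySem.Str.toList_lower]
  rw [hB]
  by_cases h0 : '0' ∈ PySem.Chars.lower domain.toList <;>
  by_cases h1 : '1' ∈ PySem.Chars.lower domain.toList <;>
  by_cases h3 : '3' ∈ PySem.Chars.lower domain.toList <;>
  by_cases h4 : '4' ∈ PySem.Chars.lower domain.toList <;>
  by_cases h5 : '5' ∈ PySem.Chars.lower domain.toList <;>
  by_cases h7 : '7' ∈ PySem.Chars.lower domain.toList <;>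
  simp [isIn_single, h0, h1, h3, h4, h5, h7, List.filter,
    PySem.Set.ofList, PySem.Set.add, PySem.Set.empty] <;>
  first
  | rfl
  | exact congrArg (PySem.Str.join ", ") (sorted_self_strings _ (by decide))
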